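-- pv_equiv track=rewrite | github.com/JamesPerisher/track-in-time-server | export_data.py | point_adder
-- ===== SOURCE A (Python) =====
-- def point_adder(b):
--     out = {}
--
--     for a in b:
--         for i in range(len(a["Points"])):
--             try:
--                 out[a["ID"][i]] += a["Points"][i]
--             except KeyError:
--                 out[a["ID"][i]] = a["Points"][i]
--     return out
-- ===== SOURCE B (Python) =====
-- def point_adder(b):
--     # Flatten all records into one (id, point) pair list, then for each distinct
--     # id (first-encounter order, via dict.fromkeys) scan the pairs and sum its points.
--     pairs = [(a["ID"][i], a["Points"][i]) for a in b for i in range(len(a["Points"]))]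
--     return {k: sum(p for q, p in pairs if q == k)
--             for k in dict.fromkeys(q for q, _ in pairs)}
-- ===== Notes on version B (the rewrite author's own statement) =====
-- stated objective: alternative
-- what changed: B keeps no dict of running totals: it flattens the input into one (id, point) pair list, deduplicates the ids in first-encounter order with dict.fromkeys, and computes each total by a fresh scan-and-sum over the whole pair list (O(n*k) instead of A's single-pass O(n) dict accumulation); Pre_ excludes inputs where A raises (missing 'Points', or 'ID' missing/shorter than 'Points' when 'Points' is nonempty).
import Mathlib
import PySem

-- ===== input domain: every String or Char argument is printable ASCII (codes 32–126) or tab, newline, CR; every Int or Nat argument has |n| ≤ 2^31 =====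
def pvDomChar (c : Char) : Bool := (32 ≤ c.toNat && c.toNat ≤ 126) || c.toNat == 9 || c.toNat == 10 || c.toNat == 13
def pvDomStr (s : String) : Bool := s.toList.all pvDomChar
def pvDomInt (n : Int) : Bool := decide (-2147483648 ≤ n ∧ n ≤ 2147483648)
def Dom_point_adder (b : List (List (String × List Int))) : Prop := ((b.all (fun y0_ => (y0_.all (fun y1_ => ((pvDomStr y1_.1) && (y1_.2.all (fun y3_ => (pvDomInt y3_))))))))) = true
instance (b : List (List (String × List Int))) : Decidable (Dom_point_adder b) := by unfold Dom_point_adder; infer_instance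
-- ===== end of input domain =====

-- B keeps no running-total dict: it flattens the input into one (id, point) pair list, dedups
-- the ids in first-encounter order, and sums each id's points by a fresh scan of the pair list ('alternative').

-- ===== PORT A =====
-- A: one pass, dict of running totals updated via try/except KeyError.
def point_adder (b : List (List (String × List Int))) : List (Int × Int) :=
  (b.foldl
    (fun (out : PySem.Dict Int Int) a =>
      let d := PySem.Dict.mk a
      (PySem.List.pyRange 0 ((d.getD "Points" []).length : Int) 1).foldl
        (fun out i =>
          let k := PySem.List.pyGetD (d.getD "ID" []) i 0
          let p := PySem.List.pyGetD (d.getD "Points" []) i 0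
          match out.get? k with          -- try: out[k] += p / except KeyError: out[k] = p
          | some v => out.insert k (v + p)
          | none   => out.insert k p)
        out)
    (PySem.Dict.mk [])).items

-- ===== PORT B =====
-- B: flatten to (id, point) pairs (nested comprehension = flatMap of map), dedup ids
-- in first-encounter order (dict.fromkeys = PySem.List.dedup), sum each id's points by filtering the pairs.
def point_adder_alt (b : List (List (String × List Int))) : List (Int × Int) :=
  let pairs := b.flatMap (fun a =>
    let d := PySem.Dict.mk a
    (PySem.List.pyRange 0 ((d.getD "Points" []).length : Int) 1).map
      (fun i => (PySem.List.pyGetD (d.getD "ID" []) i 0, PySem.List.pyGetD (d.getD "Points" []) i 0)))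
  (PySem.List.dedup (pairs.map (·.1))).map
    (fun k => (k, ((pairs.filter (fun qp => qp.1 == k)).map (·.2)).sum))

-- ===== PRECONDITION & SPEC =====
-- Pre_ admits exactly the inputs where the Python A returns: every record has a "Points" key,
-- and when its points list is nonempty an "ID" key at least as long (else A raises Key/IndexError).
def pvRecOk (a : List (String × List Int)) : Bool :=
  match (PySem.Dict.mk a).get? "Points" with
  | none => false
  | some pts =>
    pts.isEmpty ||
      match (PySem.Dict.mk a).get? "ID" with
      | none => false
      | some ids => decide (pts.length ≤ ids.length)

def Pre_point_adder (b : List (List (String × List Int))) : Prop := (b.all pvRecOk) = true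
instance (b : List (List (String × List Int))) : Decidable (Pre_point_adder b) := by unfold Pre_point_adder; infer_instance

def pvWitness_point_adder : (List (List (String × List Int))) :=
  [[("ID", [1, 2, 7]), ("Points", [3, 4])], [("Points", []), ("x", [9])], [("ID", [1]), ("Points", [5])]]

def Spec_point_adder (b : List (List (String × List Int))) (out : List (Int × Int)) : Prop := out = point_adder_alt b
instance (b : List (List (String × List Int))) (out : List (Int × Int)) : Decidable (Spec_point_adder b out) := by unfold Spec_point_adder; infer_instance

-- ===== CLAIM =====
def Claim_equal_point_adder : Prop := ∀ (b : List (List (String × List Int))), Dom_point_adder b → Pre_point_adder b → Spec_point_adder b (point_adder b)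

-- ===== LEMMAS AND PROOFS =====

-- A's try/except step is an insert of the running total (getD 0).
theorem pvStep_eq :
    (fun (out : PySem.Dict Int Int) (p : Int × Int) =>
      match out.get? p.1 with
      | some v => out.insert p.1 (v + p.2)
      | none   => out.insert p.1 p.2)
    = (fun (out : PySem.Dict Int Int) p => out.insert p.1 (out.getD p.1 0 + p.2)) := by
  funext out p
  cases h : out.get? p.1 with
  | none => simp [PySem.Dict.getD_eq_get?_getD, h]
  | some v => simp [PySem.Dict.getD_eq_get?_getD, h]

-- folding the insert step over a pair list: running total = previous total + filtered sum
theorem pvGetD_foldl (ps : List (Int × Int)) (d : PySem.Dict Int Int) (k : Int) :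
    (ps.foldl (fun (d : PySem.Dict Int Int) p => d.insert p.1 (d.getD p.1 0 + p.2)) d).getD k 0
      = d.getD k 0 + ((ps.filter (fun qp => qp.1 == k)).map (·.2)).sum := by
  induction ps generalizing d with
  | nil => simp
  | cons q rest ih =>
    simp only [List.foldl_cons, ih, List.filter_cons]
    by_cases h : q.1 = k
    · simp [h, PySem.Dict.getD_insert_self]; ring
    · simp [PySem.Dict.getD_insert, h, Ne.symm h]

-- A's nested loops are the fold of the step over B's flattened pair list.
theorem pvFlatten (b : List (List (String × List Int))) (d : PySem.Dict Int Int) :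
    b.foldl
      (fun (out : PySem.Dict Int Int) a =>
        let dd := PySem.Dict.mk a
        (PySem.List.pyRange 0 ((dd.getD "Points" []).length : Int) 1).foldl
          (fun out i =>
            let k := PySem.List.pyGetD (dd.getD "ID" []) i 0
            let p := PySem.List.pyGetD (dd.getD "Points" []) i 0
            match out.get? k with
            | some v => out.insert k (v + p)
            | none   => out.insert k p)
          out)
      d
    = (b.flatMap (fun a =>
        let dd := PySem.Dict.mk a
        (PySem.List.pyRange 0 ((dd.getD "Points" []).length : Int) 1).map
          (fun i => (PySem.List.pyGetD (dd.getD "ID" []) i 0,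
                     PySem.List.pyGetD (dd.getD "Points" []) i 0)))).foldl
        (fun (out : PySem.Dict Int Int) p =>
          match out.get? p.1 with
          | some v => out.insert p.1 (v + p.2)
          | none   => out.insert p.1 p.2)
        d := by
  induction b generalizing d with
  | nil => rfl
  | cons a rest ih =>
    simp only [List.foldl_cons, List.flatMap_cons, List.foldl_append, List.foldl_map, ih]

-- ===== VERDICT =====
theorem point_adder_spec : Claim_equal_point_adder := by
  intro b _ _
  show point_adder b = point_adder_alt b
  unfold point_adder point_adder_alt
  rw [pvFlatten, pvStep_eq]
  set ps := b.flatMap (fun a =>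
    let dd := PySem.Dict.mk a
    (PySem.List.pyRange 0 ((dd.getD "Points" []).length : Int) 1).map
      (fun i => (PySem.List.pyGetD (dd.getD "ID" []) i 0,
                 PySem.List.pyGetD (dd.getD "Points" []) i 0))) with hps
  have hkeys : (ps.foldl (fun (d : PySem.Dict Int Int) p => d.insert p.1 (d.getD p.1 0 + p.2))
      (PySem.Dict.mk [])).keys = PySem.List.dedup (ps.map (·.1)) := by
    rw [PySem.Dict.keys_foldl_insert_key (key := Prod.fst)
          (f := fun (d : PySem.Dict Int Int) p => d.getD p.1 0 + p.2)]
    simp [PySem.Set.update_nil_left, PySem.List.dedup_eq_ofList, PySem.Dict.keys]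
  have hnd : (ps.foldl (fun (d : PySem.Dict Int Int) p => d.insert p.1 (d.getD p.1 0 + p.2))
      (PySem.Dict.mk [])).keys.Nodup := by
    rw [hkeys]; exact PySem.List.nodup_dedup _
  rw [PySem.Dict.items_eq_map_keys _ hnd 0, hkeys]
  apply List.map_congr_left
  intro k _
  rw [pvGetD_foldl]
  simp [PySem.Dict.getD, PySem.Dict.get?]
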